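-- pv_equiv track=rewrite | github.com/UPCArtifacts/xTestCluster | tool_xTestCluster/src/FindDuplicatePatches.py | get_num_hunks
-- ===== SOURCE A (Python) =====
-- def get_num_hunks(patch, file_name):
--     num_hunks = 0
--     current_file_name = ''
--     for patch_line in patch:
--         if patch_line.startswith('--- '):
--             current_file_name = patch_line.split('--- ')[1]
--             if current_file_name.startswith('/'):
--                 current_file_name = current_file_name[1:]
--
--             continue
--
--         if current_file_name == file_name and patch_line.startswith('@@ -'):
--             num_hunks += 1
--
--     return num_hunks
-- ===== SOURCE B (Python) =====
-- def get_num_hunks(patch, file_name):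
--     # Pass 1: group the patch into sections, one per '--- ' header (plus an
--     # implicit initial section named '').
--     sections = [('', [])]
--     for line in patch:
--         if line.startswith('--- '):
--             name = line.split('--- ')[1]
--             if name.startswith('/'):
--                 name = name[1:]
--             sections.append((name, []))
--         else:
--             sections[-1][1].append(line)
--     # Pass 2: total the '@@ -' lines of the sections belonging to file_name.
--     return sum(sum(1 for l in lines if l.startswith('@@ -'))
--                for name, lines in sections if name == file_name)
-- ===== Notes on version B (the rewrite author's own statement) =====
-- stated objective: alternative
-- what changed: A's single interleaved stateful scan (num_hunks, current_file_name updated per line) is replaced by a build-then-aggregate decomposition: pass 1 groups the patch into named sections (implicit initial '' section, one new section per '--- ' header), pass 2 sums the '@@ -' line counts of the sections whose name equals file_name.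
import Mathlib
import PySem

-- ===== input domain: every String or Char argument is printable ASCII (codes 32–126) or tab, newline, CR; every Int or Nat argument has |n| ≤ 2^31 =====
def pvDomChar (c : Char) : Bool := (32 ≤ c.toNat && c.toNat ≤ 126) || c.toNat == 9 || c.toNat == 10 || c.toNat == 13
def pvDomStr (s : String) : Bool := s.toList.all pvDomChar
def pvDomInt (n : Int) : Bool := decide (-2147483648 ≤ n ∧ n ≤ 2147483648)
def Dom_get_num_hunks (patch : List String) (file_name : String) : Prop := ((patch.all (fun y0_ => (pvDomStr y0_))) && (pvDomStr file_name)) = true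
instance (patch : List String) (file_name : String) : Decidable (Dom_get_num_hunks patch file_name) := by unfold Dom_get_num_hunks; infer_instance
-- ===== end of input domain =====

-- B replaces A's single interleaved stateful scan by a build-groups-then-aggregate
-- decomposition (objective: alternative, same cost).

-- ===== PORT A =====
-- A: one stateful pass with (num_hunks, current_file_name) as loop state.
-- `split('--- ')[1]` is guarded by the startswith check, so index 1 always exists;
-- List.getD 1 "" is exact there.
def get_num_hunks (patch : List String) (file_name : String) : Int :=
  (patch.foldl (fun (st : Int × String) patch_line =>
      if PySem.Str.startswith patch_line "--- " then
        let cf := ((PySem.Str.split? patch_line "--- ").getD []).getD 1 ""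
        let cf := if PySem.Str.startswith cf "/" then PySem.Str.slice cf (some 1) none else cf
        (st.1, cf)
      else if st.2 == file_name && PySem.Str.startswith patch_line "@@ -" then
        (st.1 + 1, st.2)
      else st) (0, "")).1

-- ===== PORT B =====
-- B, pass 1: group the patch into named sections ('' for lines before any header);
-- a header opens a new empty section, other lines are appended to the last section.
def get_num_hunks_alt_sections (patch : List String) : List (String × List String) :=
  patch.foldl (fun (sections : List (String × List String)) line =>
      if PySem.Str.startswith line "--- " then
        let name := ((PySem.Str.split? line "--- ").getD []).getD 1 ""
        let name := if PySem.Str.startswith name "/" then PySem.Str.slice name (some 1) none else name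
        sections ++ [(name, [])]
      else
        sections.dropLast ++ [((sections.getLast!).1, (sections.getLast!).2 ++ [line])])
    [("", [])]

-- B, pass 2: total the '@@ -' lines of the sections belonging to file_name.
def get_num_hunks_alt (patch : List String) (file_name : String) : Int :=
  ((get_num_hunks_alt_sections patch).map (fun sec =>
      if sec.1 == file_name then (sec.2.countP (fun l => PySem.Str.startswith l "@@ -") : Int)
      else 0)).sum

-- ===== PRECONDITION & SPEC =====
def Spec_get_num_hunks (patch : List String) (file_name : String) (out : Int) : Prop := out = get_num_hunks_alt patch file_name
instance (patch : List String) (file_name : String) (out : Int) : Decidable (Spec_get_num_hunks patch file_name out) := by unfold Spec_get_num_hunks; infer_instance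

-- ===== CLAIM (what is proved, stated in full; the proofs are below) =====
def Claim_equal_get_num_hunks : Prop := ∀ (patch : List String) (file_name : String), Dom_get_num_hunks patch file_name → Spec_get_num_hunks patch file_name (get_num_hunks patch file_name)

-- ===== LEMMAS AND PROOFS =====

-- the shared per-line computations, for the proofs only
def pvHdr (l : String) : Bool := PySem.Str.startswith l "--- "
def pvNewName (l : String) : String :=
  let cf := ((PySem.Str.split? l "--- ").getD []).getD 1 ""
  if PySem.Str.startswith cf "/" then PySem.Str.slice cf (some 1) none else cf
def pvStepA (file_name : String) (st : Int × String) (l : String) : Int × String :=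
  if pvHdr l then (st.1, pvNewName l)
  else if st.2 == file_name && PySem.Str.startswith l "@@ -" then (st.1 + 1, st.2)
  else st
def pvStepB (sections : List (String × List String)) (l : String) : List (String × List String) :=
  if pvHdr l then sections ++ [(pvNewName l, [])]
  else sections.dropLast ++ [((sections.getLast!).1, (sections.getLast!).2 ++ [l])]
def pvAgg (file_name : String) (ss : List (String × List String)) : Int :=
  (ss.map (fun sec => if sec.1 == file_name then (sec.2.countP (fun l => PySem.Str.startswith l "@@ -") : Int) else 0)).sum

theorem pvA_eq (patch : List String) (file_name : String) :
    get_num_hunks patch file_name = (patch.foldl (pvStepA file_name) (0, "")).1 := rfl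

theorem pvB_eq (patch : List String) (file_name : String) :
    get_num_hunks_alt patch file_name = pvAgg file_name (patch.foldl pvStepB [("", [])]) := rfl

theorem pvA_shift (file_name : String) (lines : List String) (n : Int) (cur : String) :
    (lines.foldl (pvStepA file_name) (n, cur)).1
      = n + (lines.foldl (pvStepA file_name) (0, cur)).1 := by
  induction lines generalizing n cur with
  | nil => simp
  | cons l ls ih =>
    simp only [List.foldl_cons, pvStepA]
    split_ifs with h1 h2
    · rw [ih n, ih 0]
    · rw [ih (n + 1), ih (0 + 1)]; ring
    · rw [ih n, ih 0]

theorem pvAgg_append (file_name : String) (ss : List (String × List String)) (x : String × List String) :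
    pvAgg file_name (ss ++ [x]) = pvAgg file_name ss
      + (if x.1 == file_name then (x.2.countP (fun l => PySem.Str.startswith l "@@ -") : Int) else 0) := by
  simp [pvAgg]

theorem pvMain (file_name : String) (lines : List String)
    (ss : List (String × List String)) (hne : ss ≠ []) :
    pvAgg file_name (lines.foldl pvStepB ss)
      = pvAgg file_name ss
        + (lines.foldl (pvStepA file_name) (0, (ss.getLast hne).1)).1 := by
  induction lines generalizing ss with
  | nil => simp
  | cons l ls ih =>
    simp only [List.foldl_cons]
    by_cases h : pvHdr l
    · have hB : pvStepB ss l = ss ++ [(pvNewName l, [])] := by simp [pvStepB, h]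
      have hA : pvStepA file_name (0, (ss.getLast hne).1) l = (0, pvNewName l) := by
        simp [pvStepA, h, pvNewName]
      rw [hB, ih _ (by simp), pvAgg_append, hA]
      simp
    · obtain ⟨ss₀, last, rfl⟩ : ∃ ss₀ last, ss = ss₀ ++ [last] :=
        ⟨ss.dropLast, ss.getLast hne, (List.dropLast_append_getLast hne).symm⟩
      have hlast1 : ((ss₀ ++ [last]).getLast hne) = last := by simp
      have hB : pvStepB (ss₀ ++ [last]) l = ss₀ ++ [(last.1, last.2 ++ [l])] := by
        simp [pvStepB, h,]
      have hA : pvStepA file_name (0, ((ss₀ ++ [last]).getLast hne).1) l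
          = ((if last.1 == file_name && PySem.Str.startswith l "@@ -" then (1 : Int) else 0), last.1) := by
        rw [hlast1]; simp only [pvStepA, h, Bool.false_eq_true, if_false]
        split_ifs with h2 <;> simp
      rw [hB, ih _ (by simp), pvAgg_append, pvAgg_append, hA,
        pvA_shift file_name ls
          (if (last.1 == file_name && PySem.Str.startswith l "@@ -") = true then (1 : Int) else 0)
          last.1]
      have hlast2 : ((ss₀ ++ [(last.1, last.2 ++ [l])]).getLast (by simp)).1 = last.1 := by simp
      rw [hlast2]
      simp only [List.countP_append]
      by_cases hm : last.1 == file_name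
      · by_cases hh : PySem.Str.startswith l "@@ -" <;>
          simp [hm, hh, List.countP_cons] <;> ring
      · simp [hm]

-- ===== VERDICT (by name: the statement is the Claim_ definition above) =====
theorem get_num_hunks_spec : Claim_equal_get_num_hunks := by
  intro patch file_name _
  unfold Spec_get_num_hunks
  rw [pvA_eq, pvB_eq, pvMain file_name patch [("", [])] (by simp)]
  simp [pvAgg]
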